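-- pv_equiv track=rewrite | github.com/akiipli/Worldpixel | Worldpixel/scan_object.py | bounds
-- ===== SOURCE A (Python) =====
-- def bounds(x, y, level, polypoints):
--     xless = 0
--     xmore = 0
--     yless = 0
--     ymore = 0
--     count = 0
--     for i in polypoints:
--         count += 1
--         if i[0] < x - level:
--             xless += 1
--         if i[0] > x + level:
--             xmore += 1
--         if i[1] < y - level:
--             yless += 1
--         if i[1] > y + level:
--             ymore += 1
--     if (xless == count or
--         xmore == count or
--         yless == count or
--         ymore == count):
--         return False
--     return True
-- ===== SOURCE B (Python) =====
-- def bounds(x, y, level, polypoints):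
--     if all(p[0] < x - level for p in polypoints):
--         return False
--     if all(p[0] > x + level for p in polypoints):
--         return False
--     if all(p[1] < y - level for p in polypoints):
--         return False
--     if all(p[1] > y + level for p in polypoints):
--         return False
--     return True
-- ===== Notes on version B (the rewrite author's own statement) =====
-- stated objective: simpler
-- what changed: Replaces the single fused pass maintaining four counters plus a length counter with four independent short-circuiting all() scans, one per bound; on the empty list all() is vacuously True, matching A's count==0 result.
import Mathlib
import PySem

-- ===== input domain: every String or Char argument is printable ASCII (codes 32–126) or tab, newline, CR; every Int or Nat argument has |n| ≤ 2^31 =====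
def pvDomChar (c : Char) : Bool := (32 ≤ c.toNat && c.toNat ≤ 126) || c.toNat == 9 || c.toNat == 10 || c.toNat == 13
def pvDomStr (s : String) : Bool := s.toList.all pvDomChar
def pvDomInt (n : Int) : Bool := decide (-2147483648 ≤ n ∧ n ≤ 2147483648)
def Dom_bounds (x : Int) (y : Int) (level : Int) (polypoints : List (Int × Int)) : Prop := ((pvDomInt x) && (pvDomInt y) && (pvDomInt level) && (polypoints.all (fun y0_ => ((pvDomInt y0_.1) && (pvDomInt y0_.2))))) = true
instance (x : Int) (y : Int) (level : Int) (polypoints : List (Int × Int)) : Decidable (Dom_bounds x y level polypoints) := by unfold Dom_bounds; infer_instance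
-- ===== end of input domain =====

-- B replaces A's single fused counting pass with four independent short-circuiting
-- all-scans, one per bound (objective: simpler).

-- ===== PORT A =====
-- Literal port of A: one fold over the list carrying (xless, xmore, yless, ymore, count).
def bounds (x : Int) (y : Int) (level : Int) (polypoints : List (Int × Int)) : Bool :=
  let st := polypoints.foldl
    (fun (s : Int × Int × Int × Int × Int) i =>
      let (xless, xmore, yless, ymore, count) := s
      let count := count + 1
      let xless := if i.1 < x - level then xless + 1 else xless
      let xmore := if i.1 > x + level then xmore + 1 else xmore
      let yless := if i.2 < y - level then yless + 1 else yless
      let ymore := if i.2 > y + level then ymore + 1 else ymore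
      (xless, xmore, yless, ymore, count))
    (0, 0, 0, 0, 0)
  let (xless, xmore, yless, ymore, count) := st
  if xless = count ∨ xmore = count ∨ yless = count ∨ ymore = count then false
  else true

-- ===== PORT B =====
-- Port of B: four independent short-circuiting scans (List.all), in B's order.
def bounds_alt (x : Int) (y : Int) (level : Int) (polypoints : List (Int × Int)) : Bool :=
  if polypoints.all (fun p => p.1 < x - level) then false
  else if polypoints.all (fun p => p.1 > x + level) then false
  else if polypoints.all (fun p => p.2 < y - level) then false
  else if polypoints.all (fun p => p.2 > y + level) then false
  else true

-- ===== PRECONDITION & SPEC =====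
def Spec_bounds (x : Int) (y : Int) (level : Int) (polypoints : List (Int × Int)) (out : Bool) : Prop := out = bounds_alt x y level polypoints
instance (x : Int) (y : Int) (level : Int) (polypoints : List (Int × Int)) (out : Bool) : Decidable (Spec_bounds x y level polypoints out) := by unfold Spec_bounds; infer_instance

-- ===== CLAIM (what is proved, stated in full; the proofs are below) =====
def Claim_equal_bounds : Prop := ∀ (x : Int) (y : Int) (level : Int) (polypoints : List (Int × Int)), Dom_bounds x y level polypoints → Spec_bounds x y level polypoints (bounds x y level polypoints)

-- ===== LEMMAS AND PROOFS =====

-- ===== VERDICT (by name: the statement is the Claim_ definition above) =====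
-- The fold state after processing l, started from (a,b,c,d,e), is each start value
-- plus the count of elements satisfying the corresponding predicate (and e + length).
theorem bounds_fold_char (x y level : Int) (l : List (Int × Int))
    (a b c d e : Int) :
    l.foldl
      (fun (s : Int × Int × Int × Int × Int) i =>
        let (xless, xmore, yless, ymore, count) := s
        let count := count + 1
        let xless := if i.1 < x - level then xless + 1 else xless
        let xmore := if i.1 > x + level then xmore + 1 else xmore
        let yless := if i.2 < y - level then yless + 1 else yless
        let ymore := if i.2 > y + level then ymore + 1 else ymore
        (xless, xmore, yless, ymore, count))
      (a, b, c, d, e)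
    = (a + l.countP (fun p => decide (p.1 < x - level)),
       b + l.countP (fun p => decide (p.1 > x + level)),
       c + l.countP (fun p => decide (p.2 < y - level)),
       d + l.countP (fun p => decide (p.2 > y + level)),
       e + l.length) := by
  induction l generalizing a b c d e with
  | nil => simp
  | cons h t ih =>
    simp only [List.foldl_cons, List.countP_cons, List.length_cons, ih,
      decide_eq_true_eq]
    split_ifs <;> simp only [Prod.mk.injEq] <;> push_cast <;> omega

theorem countP_full (p : (Int × Int) → Bool) (l : List (Int × Int)) :
    ((l.countP p : Int) = l.length) ↔ l.all p := by
  rw [List.all_eq_true, ← List.countP_eq_length]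
  exact ⟨fun h => by exact_mod_cast h, fun h => by exact_mod_cast h⟩

set_option maxHeartbeats 1000000 in
theorem bounds_spec : Claim_equal_bounds := by
  intro x y level polypoints _
  unfold Spec_bounds bounds bounds_alt
  rw [bounds_fold_char]
  simp only [zero_add, countP_full]
  by_cases h1 : polypoints.all (fun p => p.1 < x - level) <;>
  by_cases h2 : polypoints.all (fun p => p.1 > x + level) <;>
  by_cases h3 : polypoints.all (fun p => p.2 < y - level) <;>
  by_cases h4 : polypoints.all (fun p => p.2 > y + level) <;>
    simp_all
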